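-- pv_equiv track=rewrite | github.com/ZKI-PH-ImageAnalysis/seq2squiggle | src/seq2squiggle/preprocess.py | get_dna2signal_idxs
-- ===== SOURCE A (Python) =====
-- from typing import List, Optional, Tuple, Generator, Any, Dict
--
-- def get_dna2signal_idxs(signal_len: List[int]) -> List[Tuple[int, int]]:
--     """
--     Generates a list of tuples representing the start and end indices for mapping DNA sequences to signal data.
--
--     Parameters
--     ----------
--     signal_len : List[int]
--         List of lengths of the signal segments corresponding to DNA sequences.
--
--     Returns
--     -------
--     List[Tuple[int, int]]
--         List of tuples where each tuple contains the start and end indices for each DNA segment in the signal data.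
--     """
--     start_idx = 0
--     end_idx = 0
--     dna2signal_idxs = []
--     for i in signal_len:
--         end_idx += i
--         dna2signal_idxs.append((start_idx, end_idx))
--         start_idx += i
--     return dna2signal_idxs
-- ===== SOURCE B (Python) =====
-- from typing import List, Tuple
--
-- def get_dna2signal_idxs(signal_len: List[int]) -> List[Tuple[int, int]]:
--     # Build the index pairs from the RIGHT: start from the total length and
--     # subtract each segment while walking the list backwards, then reverse.
--     out = []
--     e = sum(signal_len)
--     for i in reversed(signal_len):
--         out.append((e - i, e))
--         e -= i
--     out.reverse()
--     return out
-- ===== Notes on version B (the rewrite author's own statement) =====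
-- stated objective: alternative
-- what changed: Instead of A's forward pass maintaining two running counters, B first computes the total length and then walks the list backwards, emitting each (end-i, end) pair by subtracting from a shrinking suffix total, finally reversing the collected list.
import Mathlib
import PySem

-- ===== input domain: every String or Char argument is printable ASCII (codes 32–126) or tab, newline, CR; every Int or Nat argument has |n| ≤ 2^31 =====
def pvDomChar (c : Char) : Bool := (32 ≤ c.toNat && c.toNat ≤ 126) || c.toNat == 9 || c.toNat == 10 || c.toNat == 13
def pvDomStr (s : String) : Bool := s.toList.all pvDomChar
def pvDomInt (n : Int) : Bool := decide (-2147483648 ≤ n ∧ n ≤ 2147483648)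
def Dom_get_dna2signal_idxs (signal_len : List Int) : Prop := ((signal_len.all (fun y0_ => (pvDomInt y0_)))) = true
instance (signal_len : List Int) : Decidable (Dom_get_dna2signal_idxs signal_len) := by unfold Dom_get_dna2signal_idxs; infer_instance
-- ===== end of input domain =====

-- B builds the pairs back-to-front from the total sum by suffix subtraction (alternative decomposition, same cost).
-- ===== PORT A =====
-- literal port of A's loop: state (start_idx, end_idx, dna2signal_idxs)
def get_dna2signal_idxs (signal_len : List Int) : List (Int × Int) :=
  (signal_len.foldl
    (fun (st : Int × Int × List (Int × Int)) i =>
      (st.1 + i, st.2.1 + i, st.2.2 ++ [(st.1, st.2.1 + i)]))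
    (0, 0, [])).2.2

-- ===== PORT B =====
-- Source B: e = sum(signal_len); for i in reversed(signal_len): out.append((e-i, e)); e -= i; out.reverse()
def get_dna2signal_idxs_alt (signal_len : List Int) : List (Int × Int) :=
  let total := signal_len.foldl (· + ·) 0
  let st := signal_len.reverse.foldl
    (fun (st : List (Int × Int) × Int) i => (st.1 ++ [(st.2 - i, st.2)], st.2 - i))
    ([], total)
  st.1.reverse

-- ===== PRECONDITION & SPEC =====
def Spec_get_dna2signal_idxs (signal_len : List Int) (out : List (Int × Int)) : Prop := out = get_dna2signal_idxs_alt signal_len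
instance (signal_len : List Int) (out : List (Int × Int)) : Decidable (Spec_get_dna2signal_idxs signal_len out) := by unfold Spec_get_dna2signal_idxs; infer_instance

-- ===== CLAIM =====
def Claim_equal_get_dna2signal_idxs : Prop := ∀ (signal_len : List Int), Dom_get_dna2signal_idxs signal_len → Spec_get_dna2signal_idxs signal_len (get_dna2signal_idxs signal_len)

-- ===== LEMMAS AND PROOFS =====

-- the common specification: pairs from a running start s
def pvPairs (s : Int) : List Int → List (Int × Int)
  | [] => []
  | x :: xs => (s, s + x) :: pvPairs (s + x) xs

theorem foldA_inv (l : List Int) (s : Int) (acc : List (Int × Int)) :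
    (l.foldl
      (fun (st : Int × Int × List (Int × Int)) i =>
        (st.1 + i, st.2.1 + i, st.2.2 ++ [(st.1, st.2.1 + i)]))
      (s, s, acc)).2.2
    = acc ++ pvPairs s l := by
  induction l generalizing s acc with
  | nil => simp [pvPairs]
  | cons x xs ih => simp [pvPairs, ih]

-- B's backward fold, phrased as foldr, produces the pairs for suffix sum e
theorem foldB_inv (l : List Int) (e : Int) :
    (l.foldr
      (fun i (st : List (Int × Int) × Int) => (st.1 ++ [(st.2 - i, st.2)], st.2 - i))
      ([], e))
    = (((pvPairs (e - l.foldl (· + ·) 0) l).reverse), e - l.foldl (· + ·) 0) := by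
  induction l generalizing e with
  | nil => simp [pvPairs]
  | cons x xs ih =>
    have hsum : ∀ (s : Int) (ys : List Int), ys.foldl (· + ·) s = s + ys.foldl (· + ·) 0 := by
      intro s ys
      induction ys generalizing s with
      | nil => simp
      | cons y ys ihy => simp only [List.foldl_cons]; rw [ihy (s + y), ihy (0 + y)]; ring
    simp only [List.foldr_cons, ih, pvPairs, List.foldl_cons]
    rw [hsum (0 + x) xs]
    have hx : e - (0 + x + xs.foldl (· + ·) 0) = e - xs.foldl (· + ·) 0 - x := by ring
    rw [hx]
    have hx2 : e - xs.foldl (· + ·) 0 - x + x = e - xs.foldl (· + ·) 0 := by ring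
    rw [hx2, List.reverse_cons]

-- ===== VERDICT =====
theorem get_dna2signal_idxs_spec : Claim_equal_get_dna2signal_idxs := by
  intro l _
  show get_dna2signal_idxs l = get_dna2signal_idxs_alt l
  unfold get_dna2signal_idxs get_dna2signal_idxs_alt
  rw [foldA_inv, List.nil_append]
  simp only [List.foldl_reverse]
  rw [foldB_inv, sub_self]
  simp
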